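-- pv_equiv track=rewrite | github.com/PeteMango/Contest | LeetCode/LeetCode Contests/W/W387/100234.py | cost_not_y
-- ===== SOURCE A (Python) =====
-- from typing import List
--
-- def cost_not_y(arr: List[List[int]], val: int) -> int:
--     n = len(arr)
--
--     cost_not_y = 0
--
--     for i in range(int((n+1)/2)):
--         for j in range(n):
--             if j != i and j != n - i - 1 and arr[i][j] != val:
--                 cost_not_y += 1
--
--     for i in range(int((n+1)/2), n):
--         for j in range(n):
--             if j != int(n/2) and arr[i][j] != val:
--                 cost_not_y += 1
--
--     return cost_not_y
-- ===== SOURCE B (Python) =====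
-- from typing import List
--
-- def cost_not_y(arr: List[List[int]], val: int) -> int:
--     # Count every non-matching cell in the n x n grid, then subtract the
--     # non-matching cells lying on the Y (two top diagonals + lower middle column),
--     # one linear correction pass instead of a conditional double scan.
--     n = len(arr)
--     total = 0
--     for row in arr:
--         for j in range(n):
--             if row[j] != val:
--                 total += 1
--     excl = 0
--     for i in range(n):
--         if i < (n + 1) // 2:
--             if arr[i][i] != val:
--                 excl += 1
--             if i != n - 1 - i and arr[i][n - 1 - i] != val:
--                 excl += 1
--         elif arr[i][n // 2] != val:
--             excl += 1
--     return total - excl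
-- ===== Notes on version B (the rewrite author's own statement) =====
-- stated objective: alternative
-- what changed: B counts all non-matching cells of the n x n grid in one full pass and then subtracts a separate linear correction pass over the Y positions (two top diagonals, lower middle column), instead of A's per-cell exclusion tests inside two conditional double scans.
-- outside the precondition, e.g. on cost_not_y([[], [5]], 0): A returns 1, B raises IndexError
import Mathlib
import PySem

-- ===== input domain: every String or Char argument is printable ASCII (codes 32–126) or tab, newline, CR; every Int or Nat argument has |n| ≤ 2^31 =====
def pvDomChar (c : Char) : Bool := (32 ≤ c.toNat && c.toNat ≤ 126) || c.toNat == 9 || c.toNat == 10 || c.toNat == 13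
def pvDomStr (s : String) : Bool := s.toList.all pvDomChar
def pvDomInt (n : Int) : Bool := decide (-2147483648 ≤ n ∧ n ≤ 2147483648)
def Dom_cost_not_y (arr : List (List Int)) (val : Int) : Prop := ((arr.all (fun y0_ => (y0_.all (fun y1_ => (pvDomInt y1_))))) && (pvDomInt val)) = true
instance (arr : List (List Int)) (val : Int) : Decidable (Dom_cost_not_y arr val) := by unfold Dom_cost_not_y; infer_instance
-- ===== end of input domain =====

-- B replaces A's two conditional double scans by a full non-matching count plus a linear
-- correction pass over the Y positions (alternative decomposition, same O(n^2) cost).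


-- ===== PORT A =====
-- int((n+1)/2) and int(n/2) in A equal floor division for n = len(arr) ≥ 0, ported as floordiv.
def cost_not_y (arr : List (List Int)) (val : Int) : Int :=
  let n : Int := arr.length
  let c1 : Int :=
    (PySem.List.pyRange 0 (PySem.Int.floordiv (n + 1) 2) 1).foldl (fun acc i =>
      (PySem.List.pyRange 0 n 1).foldl (fun acc j =>
        if j ≠ i ∧ j ≠ n - i - 1 ∧ PySem.List.pyGetD (PySem.List.pyGetD arr i []) j 0 ≠ val
        then acc + 1 else acc) acc) 0
  (PySem.List.pyRange (PySem.Int.floordiv (n + 1) 2) n 1).foldl (fun acc i =>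
    (PySem.List.pyRange 0 n 1).foldl (fun acc j =>
      if j ≠ PySem.Int.floordiv n 2 ∧ PySem.List.pyGetD (PySem.List.pyGetD arr i []) j 0 ≠ val
      then acc + 1 else acc) acc) c1

-- ===== PORT B =====
def cost_not_y_alt (arr : List (List Int)) (val : Int) : Int :=
  let n : Int := arr.length
  let total : Int :=
    arr.foldl (fun acc row =>
      (PySem.List.pyRange 0 n 1).foldl (fun acc j =>
        if PySem.List.pyGetD row j 0 ≠ val then acc + 1 else acc) acc) 0
  let excl : Int :=
    (PySem.List.pyRange 0 n 1).foldl (fun acc i =>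
      if i < PySem.Int.floordiv (n + 1) 2 then
        let acc := if PySem.List.pyGetD (PySem.List.pyGetD arr i []) i 0 ≠ val then acc + 1 else acc
        if i ≠ n - 1 - i ∧ PySem.List.pyGetD (PySem.List.pyGetD arr i []) (n - 1 - i) 0 ≠ val
        then acc + 1 else acc
      else
        if PySem.List.pyGetD (PySem.List.pyGetD arr i []) (PySem.Int.floordiv n 2) 0 ≠ val
        then acc + 1 else acc) 0
  total - excl


-- ===== PRECONDITION & SPEC =====
-- Pre_ requires every row to have at least n = len(arr) entries; it excludes ragged grids,
-- on some of which A still returns (it never reads the cells on the Y) while B's full pass raises IndexError.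
def Pre_cost_not_y (arr : List (List Int)) (val : Int) : Prop :=
  ∀ row ∈ arr, arr.length ≤ row.length
instance (arr : List (List Int)) (val : Int) : Decidable (Pre_cost_not_y arr val) := by
  unfold Pre_cost_not_y; infer_instance
def pvWitness_cost_not_y : List (List Int) × Int := ([[1, 2, 3], [4, 5, 6], [7, 8, 9]], 5)
def Spec_cost_not_y (arr : List (List Int)) (val : Int) (out : Int) : Prop := out = cost_not_y_alt arr val
instance (arr : List (List Int)) (val : Int) (out : Int) : Decidable (Spec_cost_not_y arr val out) := by unfold Spec_cost_not_y; infer_instance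

-- ===== CLAIM (what is proved, stated in full; the proofs are below) =====
def Claim_equal_cost_not_y : Prop := ∀ (arr : List (List Int)) (val : Int), Dom_cost_not_y arr val → Pre_cost_not_y arr val → Spec_cost_not_y arr val (cost_not_y arr val)

-- ===== LEMMAS AND PROOFS =====

lemma loop_cnt (n : Nat) (P : Int → Prop) [DecidablePred P] (acc : Int) :
    (PySem.List.pyRange 0 (n : Int) 1).foldl (fun a j => if P j then a + 1 else a) acc
      = acc + ((List.range n).countP (fun (k : Nat) => decide (P (k : Int))) : Int) := by
  rw [PySem.List.pyRange_zero_natCast, List.foldl_map]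
  simpa using PySem.List.foldl_count_if (fun (k : Nat) => decide (P (k : Int))) (List.range n) acc

lemma ex1 (p : Nat → Bool) (i n : Nat) (hi : i < n) :
    (((List.range n).countP (fun j => decide (j ≠ i) && p j)) : Int)
      = ((List.range n).countP p : Int) - (if p i then 1 else 0) := by
  induction n with
  | zero => omega
  | succ n ih =>
    rw [List.range_succ, List.countP_append, List.countP_append]
    by_cases h : i = n
    · subst h
      have hc : (List.range i).countP (fun j => decide (j ≠ i) && p j) = (List.range i).countP p := by
        apply List.countP_congr; intro j hj
        have hj' : j < i := List.mem_range.mp hj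
        simp [Nat.ne_of_lt hj']
      have hs1 : List.countP (fun j => decide (j ≠ i) && p j) [i] = 0 := by
        simp
      have hs2 : (List.countP p [i] : Int) = if p i then 1 else 0 := by
        simp [List.countP_cons]
      push_cast [hc, hs1]
      rw [hs2]; ring
    · have hs : List.countP (fun j => decide (j ≠ i) && p j) [n] = List.countP p [n] := by
        have hne : ¬ n = i := fun hn => h hn.symm
        simp [List.countP_cons, hne]
      have := ih (by omega)
      push_cast [hs] at this ⊢
      omega

lemma ex2 (p : Nat → Bool) (i m n : Nat) (hi : i < n) (hm : m < n) :
    (((List.range n).countP (fun j => decide (j ≠ i) && (decide (j ≠ m) && p j))) : Int)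
      = ((List.range n).countP p : Int) - (if p i then 1 else 0)
        - (if i ≠ m ∧ p m then 1 else 0) := by
  by_cases h : i = m
  · subst h
    have hc : (List.range n).countP (fun j => decide (j ≠ i) && (decide (j ≠ i) && p j))
        = (List.range n).countP (fun j => decide (j ≠ i) && p j) := by
      apply List.countP_congr; intro j hj
      by_cases hji : j = i <;> simp [hji]
    rw [hc, ex1 p i n hi]
    simp
  · rw [ex1 (fun j => decide (j ≠ m) && p j) i n hi, ex1 p m n hm]
    have h1 : (decide (i ≠ m) && p i) = p i := by simp [h]
    rw [h1]
    have h2 : (if i ≠ m ∧ p m then (1:Int) else 0) = (if p m then 1 else 0) := by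
      simp [h]
    rw [h2]; ring

lemma self_eq_map_range {α : Type} (xs : List α) (d : α) :
    xs = (List.range xs.length).map (fun i => xs.getD i d) := by
  apply List.ext_getElem
  · simp
  · intro i h1 h2
    simp [List.getD_eq_getElem?_getD, List.getElem?_eq_getElem h1]

lemma sum_map_sub {α : Type} (l : List α) (f g : α → Int) :
    (l.map (fun x => f x - g x)).sum = (l.map f).sum - (l.map g).sum := by
  induction l with
  | nil => simp
  | cons x xs ih => simp [ih]; ring

lemma map_range_split {α : Type} (f : Nat → α) (n h : Nat) (hh : h ≤ n) :
    List.map f (List.range n) = List.map f (List.range h) ++ List.map (fun k => f (h + k)) (List.range (n - h)) := by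
  conv_lhs => rw [show n = h + (n - h) from by omega]
  rw [List.range_add, List.map_append, List.map_map]
  rfl

lemma cost_not_y_eq_alt (arr : List (List Int)) (val : Int) :
    cost_not_y arr val = cost_not_y_alt arr val := by
  unfold cost_not_y cost_not_y_alt
  set N := arr.length with hN
  set H : Nat := (N + 1) / 2 with hH
  set M : Nat := N / 2 with hM
  have hHle : H ≤ N := by omega
  have hfd1 : PySem.Int.floordiv ((N : Int) + 1) 2 = (H : Int) := by
    have h := PySem.Int.floordiv_natCast (N + 1) 2
    rw [hH]; exact_mod_cast h
  have hfd2 : PySem.Int.floordiv (N : Int) 2 = (M : Int) := by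
    exact_mod_cast PySem.Int.floordiv_natCast N 2
  simp only [hfd1, hfd2]
  -- inner loops -> counts
  have h1 : ∀ (acc i : Int),
      (PySem.List.pyRange 0 (N : Int) 1).foldl (fun acc j =>
        if j ≠ i ∧ j ≠ (N : Int) - i - 1 ∧ PySem.List.pyGetD (PySem.List.pyGetD arr i []) j 0 ≠ val
        then acc + 1 else acc) acc
      = acc + (((List.range N).countP (fun (k : Nat) =>
          decide ((k : Int) ≠ i ∧ (k : Int) ≠ (N : Int) - i - 1 ∧
            PySem.List.pyGetD (PySem.List.pyGetD arr i []) (k : Int) 0 ≠ val))) : Int) :=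
    fun acc i => loop_cnt N _ acc
  have h2 : ∀ (acc i : Int),
      (PySem.List.pyRange 0 (N : Int) 1).foldl (fun acc j =>
        if j ≠ (M : Int) ∧ PySem.List.pyGetD (PySem.List.pyGetD arr i []) j 0 ≠ val
        then acc + 1 else acc) acc
      = acc + (((List.range N).countP (fun (k : Nat) =>
          decide ((k : Int) ≠ (M : Int) ∧
            PySem.List.pyGetD (PySem.List.pyGetD arr i []) (k : Int) 0 ≠ val))) : Int) :=
    fun acc i => loop_cnt N _ acc
  have h3 : ∀ (acc : Int) (row : List Int),
      (PySem.List.pyRange 0 (N : Int) 1).foldl (fun acc j =>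
        if PySem.List.pyGetD row j 0 ≠ val then acc + 1 else acc) acc
      = acc + (((List.range N).countP (fun (k : Nat) =>
          decide (PySem.List.pyGetD row (k : Int) 0 ≠ val))) : Int) :=
    fun acc row => loop_cnt N _ acc
  simp only [h1, h2, h3]
  -- excl body -> additive form
  have hE : ∀ (acc i : Int),
      (if i < (H : Int) then
        if i ≠ (N : Int) - 1 - i ∧ PySem.List.pyGetD (PySem.List.pyGetD arr i []) ((N : Int) - 1 - i) 0 ≠ val then
          (if PySem.List.pyGetD (PySem.List.pyGetD arr i []) i 0 ≠ val then acc + 1 else acc) + 1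
        else if PySem.List.pyGetD (PySem.List.pyGetD arr i []) i 0 ≠ val then acc + 1 else acc
      else if PySem.List.pyGetD (PySem.List.pyGetD arr i []) (M : Int) 0 ≠ val then acc + 1 else acc)
      = acc + (if i < (H : Int) then
          (if PySem.List.pyGetD (PySem.List.pyGetD arr i []) i 0 ≠ val then (1:Int) else 0)
          + (if i ≠ (N : Int) - 1 - i ∧ PySem.List.pyGetD (PySem.List.pyGetD arr i []) ((N : Int) - 1 - i) 0 ≠ val then (1:Int) else 0)
        else (if PySem.List.pyGetD (PySem.List.pyGetD arr i []) (M : Int) 0 ≠ val then (1:Int) else 0)) := by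
    intro acc i
    split_ifs <;> ring
  simp only [hE]
  rw [PySem.List.foldl_add arr, PySem.List.foldl_add (PySem.List.pyRange 0 (H : Int) 1),
      PySem.List.foldl_add (PySem.List.pyRange (H : Int) (N : Int) 1),
      PySem.List.foldl_add (PySem.List.pyRange 0 (N : Int) 1)]
  have hsplitR : PySem.List.pyRange 0 (N : Int) 1
      = PySem.List.pyRange 0 (H : Int) 1 ++ PySem.List.pyRange (H : Int) (N : Int) 1 :=
    PySem.List.pyRange_one_append 0 _ _ (Int.natCast_nonneg H) (by exact_mod_cast hHle)
  rw [hsplitR, List.map_append, List.sum_append]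
  have htot : List.map (fun row => (↑(List.countP (fun (k : Nat) => decide (PySem.List.pyGetD row (k : Int) 0 ≠ val)) (List.range N)) : Int)) arr
      = List.map (fun i => (↑(List.countP (fun (k : Nat) => decide (PySem.List.pyGetD (arr.getD i []) (k : Int) 0 ≠ val)) (List.range N)) : Int)) (List.range N) := by
    conv_lhs => rw [self_eq_map_range arr []]
    rw [List.map_map]
    rfl
  rw [htot]
  rw [map_range_split (fun i => (↑(List.countP (fun (k : Nat) => decide (PySem.List.pyGetD (arr.getD i []) (k : Int) 0 ≠ val)) (List.range N)) : Int)) N H hHle]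
  rw [List.sum_append]
  rw [PySem.List.pyRange_zero_natCast H]
  rw [PySem.List.pyRange_one (H : Int) (N : Int)]
  rw [show ((N : Int) - (H : Int)).toNat = N - H from by omega]
  simp only [List.map_map]
  -- pointwise, first block: rows 0 ≤ k < H
  have pt1 : ∀ k ∈ List.range H,
      ((fun i => (↑(List.countP (fun (kk : Nat) => decide ((kk : Int) ≠ i ∧ (kk : Int) ≠ (N : Int) - i - 1 ∧ PySem.List.pyGetD (PySem.List.pyGetD arr i []) (kk : Int) 0 ≠ val)) (List.range N)) : Int)) ∘ (fun (k : Nat) => (k : Int))) k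
      = (fun i => (↑(List.countP (fun (k : Nat) => decide (PySem.List.pyGetD (arr.getD i []) (k : Int) 0 ≠ val)) (List.range N)) : Int)) k
        - ((fun i =>
            if i < (H : Int) then
              (if PySem.List.pyGetD (PySem.List.pyGetD arr i []) i 0 ≠ val then (1:Int) else 0) +
                if i ≠ (N : Int) - 1 - i ∧ PySem.List.pyGetD (PySem.List.pyGetD arr i []) ((N : Int) - 1 - i) 0 ≠ val then (1:Int) else 0
            else if PySem.List.pyGetD (PySem.List.pyGetD arr i []) (M : Int) 0 ≠ val then (1:Int) else 0) ∘ (fun (k : Nat) => (k : Int))) k := by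
    intro k hk
    have hkH : k < H := List.mem_range.mp hk
    have hkN : k < N := by omega
    have hc1 : ((N - 1 - k : Nat) : Int) = (N : Int) - (k : Int) - 1 := by omega
    have hc2 : ((N - 1 - k : Nat) : Int) = (N : Int) - 1 - (k : Int) := by omega
    simp only [Function.comp_apply]
    rw [if_pos (show ((k : Nat) : Int) < (H : Int) from by exact_mod_cast hkH)]
    have hL : List.countP (fun (kk : Nat) => decide ((kk : Int) ≠ (k : Int) ∧ (kk : Int) ≠ (N : Int) - (k : Int) - 1 ∧ PySem.List.pyGetD (PySem.List.pyGetD arr (k : Int) []) (kk : Int) 0 ≠ val)) (List.range N)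
        = List.countP (fun (j : Nat) => decide (j ≠ k) && (decide (j ≠ (N - 1 - k)) && decide ((arr.getD k []).getD j 0 ≠ val))) (List.range N) := by
      apply List.countP_congr
      intro j hj
      rw [← hc1]
      simp [PySem.List.pyGetD_natCast]
    have hR : List.countP (fun (j : Nat) => decide (PySem.List.pyGetD (arr.getD k []) (j : Int) 0 ≠ val)) (List.range N)
        = List.countP (fun (j : Nat) => decide ((arr.getD k []).getD j 0 ≠ val)) (List.range N) := by
      apply List.countP_congr
      intro j hj
      simp [PySem.List.pyGetD_natCast]
    rw [hL, hR, ex2 (fun (j : Nat) => decide ((arr.getD k []).getD j 0 ≠ val)) k (N - 1 - k) N hkN (by omega)]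
    rw [← hc2]
    simp only [PySem.List.pyGetD_natCast, ne_eq, Int.natCast_inj, decide_eq_true_eq]
    ring
  -- pointwise, second block: rows H ≤ H + k < N
  have pt2 : ∀ k ∈ List.range (N - H),
      ((fun i => (↑(List.countP (fun (kk : Nat) => decide ((kk : Int) ≠ (M : Int) ∧ PySem.List.pyGetD (PySem.List.pyGetD arr i []) (kk : Int) 0 ≠ val)) (List.range N)) : Int)) ∘ (fun (k : Nat) => (H : Int) + (k : Int))) k
      = (fun (k : Nat) => (↑(List.countP (fun (kk : Nat) => decide (PySem.List.pyGetD (arr.getD (H + k) []) (kk : Int) 0 ≠ val)) (List.range N)) : Int)) k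
        - ((fun i =>
            if i < (H : Int) then
              (if PySem.List.pyGetD (PySem.List.pyGetD arr i []) i 0 ≠ val then (1:Int) else 0) +
                if i ≠ (N : Int) - 1 - i ∧ PySem.List.pyGetD (PySem.List.pyGetD arr i []) ((N : Int) - 1 - i) 0 ≠ val then (1:Int) else 0
            else if PySem.List.pyGetD (PySem.List.pyGetD arr i []) (M : Int) 0 ≠ val then (1:Int) else 0) ∘ (fun (k : Nat) => (H : Int) + (k : Int))) k := by
    intro k hk
    have hkNH : k < N - H := List.mem_range.mp hk
    have hN1 : 1 ≤ N := by omega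
    have hMN : M < N := by omega
    simp only [Function.comp_apply]
    rw [if_neg (show ¬ ((H : Int) + (k : Int) < (H : Int)) from by omega)]
    have harr : PySem.List.pyGetD arr ((H : Int) + (k : Int)) [] = arr.getD (H + k) [] := by
      rw [show (H : Int) + (k : Int) = ((H + k : Nat) : Int) from by push_cast; ring]
      exact PySem.List.pyGetD_natCast arr (H + k) []
    have hcadd : (H : Int) + (k : Int) = ((H + k : Nat) : Int) := by push_cast; ring
    rw [hcadd]
    have hL : List.countP (fun (kk : Nat) => decide ((kk : Int) ≠ (M : Int) ∧ PySem.List.pyGetD (PySem.List.pyGetD arr ((H + k : Nat) : Int) []) (kk : Int) 0 ≠ val)) (List.range N)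
        = List.countP (fun (j : Nat) => decide (j ≠ M) && decide ((arr.getD (H + k) []).getD j 0 ≠ val)) (List.range N) := by
      apply List.countP_congr
      intro j hj
      simp [harr, PySem.List.pyGetD_natCast]
    have hR : List.countP (fun (kk : Nat) => decide (PySem.List.pyGetD (arr.getD (H + k) []) (kk : Int) 0 ≠ val)) (List.range N)
        = List.countP (fun (j : Nat) => decide ((arr.getD (H + k) []).getD j 0 ≠ val)) (List.range N) := by
      apply List.countP_congr
      intro j hj
      simp [PySem.List.pyGetD_natCast]
    rw [hL, hR, ex1 (fun (j : Nat) => decide ((arr.getD (H + k) []).getD j 0 ≠ val)) M N hMN]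
    simp only [PySem.List.pyGetD_natCast, decide_eq_true_eq]
  rw [List.map_congr_left pt1, List.map_congr_left pt2, sum_map_sub, sum_map_sub]
  ring

-- ===== VERDICT (by name: the statement is the Claim_ definition above) =====
theorem cost_not_y_spec : Claim_equal_cost_not_y := by
  intro arr val _hdom _hpre
  unfold Spec_cost_not_y
  exact cost_not_y_eq_alt arr val
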